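-- pv_equiv track=rewrite | github.com/apecr/katas | alternating_split/src/alternating_split.py | decrypt_single
-- ===== SOURCE A (Python) =====
-- from math import floor
--
-- def decrypt_single(text):
--     list = []
--     i = 0
--     middle = floor(len(text)/2) - 1
--     for char in text:
--         if i <= middle:
--             list.insert(i*2 + 1, char)
--         else:
--             list.insert(2*(i -1 - middle), char)
--         i += 1
--     return ''.join(list)
-- ===== SOURCE B (Python) =====
-- def decrypt_single(text):
--     # Split at the midpoint and interleave the two halves directly
--     # into a preallocated array: one O(n) pass instead of repeated
--     # list.insert shifts.
--     n = len(text)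
--     h = n // 2
--     res = [''] * n
--     res[::2] = text[h:]
--     res[1::2] = text[:h]
--     return ''.join(res)
-- ===== Notes on version B (the rewrite author's own statement) =====
-- stated objective: faster
-- what changed: Replaced the per-character list.insert at computed positions (each insert shifts the tail, O(n^2) total) by splitting the text at n//2 and writing the two halves into the even/odd slots of a preallocated array in one O(n) pass.
import Mathlib
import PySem

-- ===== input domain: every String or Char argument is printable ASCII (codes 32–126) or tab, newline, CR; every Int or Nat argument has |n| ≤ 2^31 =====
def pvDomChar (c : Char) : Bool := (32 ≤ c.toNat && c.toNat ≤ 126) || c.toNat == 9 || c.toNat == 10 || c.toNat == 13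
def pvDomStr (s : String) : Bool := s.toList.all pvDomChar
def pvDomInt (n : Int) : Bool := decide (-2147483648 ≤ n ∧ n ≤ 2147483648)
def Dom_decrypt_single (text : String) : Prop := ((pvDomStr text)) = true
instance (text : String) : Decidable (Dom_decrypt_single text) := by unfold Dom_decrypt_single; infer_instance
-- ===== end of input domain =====

-- B replaces A's quadratic per-character list.insert by an O(n) split-and-interleave of the two halves.

-- ===== PORT A =====
-- the loop body of A: insert at i*2+1 while i <= middle, else at 2*(i-1-middle)
def pvStepA (mid : Int) (p : List Char × Int) (ch : Char) : List Char × Int :=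
  if p.2 ≤ mid then (PySem.List.insert p.1 (p.2 * 2 + 1) ch, p.2 + 1)
  else (PySem.List.insert p.1 (2 * (p.2 - 1 - mid)) ch, p.2 + 1)

def decrypt_single (text : String) : String :=
  let middle : Int := PySem.Int.floordiv (PySem.Str.len text) 2 - 1
  let st := text.toList.foldl (pvStepA middle) ([], 0)
  String.ofList st.1

-- ===== PORT B =====
-- res[::2] = second; res[1::2] = first  —  interleave second with first (second may be one longer)
def pvWeave : List Char → List Char → List Char
  | x :: xs, y :: ys => x :: y :: pvWeave xs ys
  | xs, [] => xs
  | [], ys => ys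

def decrypt_single_alt (text : String) : String :=
  let cs := text.toList
  let h := cs.length / 2
  String.ofList (pvWeave (cs.drop h) (cs.take h))

-- ===== PRECONDITION & SPEC =====
def Spec_decrypt_single (text : String) (out : String) : Prop := out = decrypt_single_alt text
instance (text : String) (out : String) : Decidable (Spec_decrypt_single text out) := by unfold Spec_decrypt_single; infer_instance

-- ===== CLAIM (what is proved, stated in full; the proofs are below) =====
def Claim_equal_decrypt_single : Prop := ∀ (text : String), Dom_decrypt_single text → Spec_decrypt_single text (decrypt_single text)

-- ===== LEMMAS AND PROOFS =====

-- list.insert clamps an index past the end to an append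
lemma pv_insert_ge {α : Type} (xs : List α) (i : Int) (v : α) (h : (xs.length : Int) ≤ i) :
    PySem.List.insert xs i v = xs ++ [v] := by
  simp only [PySem.List.insert, PySem.List.sliceIndices]
  have h0 : ¬ (i < 0) := by omega
  have h1 : min i (xs.length : Int) = (xs.length : Int) := by omega
  simp [h0, h1]

-- inserting exactly at the boundary of W inside W ++ R
lemma pv_insert_mid {α : Type} (xs ys : List α) (v : α) :
    PySem.List.insert (xs ++ ys) (xs.length : Int) v = xs ++ v :: ys := by
  rw [PySem.List.insert_natCast _ _ _ (by simp)]
  simp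

-- phase 1 of A's loop (i ≤ mid throughout): every insert lands past the end, so it appends
lemma pv_phase1 (mid : Int) : ∀ (F acc : List Char) (i : Int),
    i = (acc.length : Int) → i + F.length ≤ mid + 1 →
    F.foldl (pvStepA mid) (acc, i) = (acc ++ F, i + F.length) := by
  intro F
  induction F with
  | nil => intro acc i _ _; simp
  | cons c F ih =>
      intro acc i hi hb
      have hle : i ≤ mid := by
        have : (0:Int) ≤ F.length := by positivity
        simp only [List.length_cons] at hb; push_cast at hb; omega
      have hins : PySem.List.insert acc (i * 2 + 1) c = acc ++ [c] := by
        apply pv_insert_ge; omega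
      simp only [List.foldl_cons, pvStepA, hle, if_pos, hins]
      rw [ih (acc ++ [c]) (i + 1) (by simp; omega)
            (by simp only [List.length_cons] at hb; push_cast at hb ⊢; omega)]
      simp only [Prod.mk.injEq]
      refine ⟨by simp, by simp only [List.length_cons]; push_cast; omega⟩
  
-- phase 2 of A's loop: each char of S is inserted at the even boundary 2*(i-1-mid),
-- weaving S into R
lemma pv_phase2 (mid : Int) : ∀ (S W R : List Char) (i : Int),
    S.length ≤ R.length + 1 → 2 * (i - 1 - mid) = (W.length : Int) →
    (S.foldl (pvStepA mid) (W ++ R, i)).1 = W ++ pvWeave S R := by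
  intro S
  induction S with
  | nil =>
      intro W R i _ _
      simp only [List.foldl_nil]
      cases R with
      | nil => simp [pvWeave]
      | cons r R => simp [pvWeave]
  | cons c S ih =>
      intro W R i hlen hW
      have hgt : ¬ (i ≤ mid) := by
        have : (0:Int) ≤ W.length := by positivity
        omega
      have hpos : (2 : Int) * (i - 1 - mid) = (W.length : Int) := hW
      simp only [List.foldl_cons, pvStepA, hgt, if_neg, not_false_iff]
      rw [hpos, pv_insert_mid]
      cases R with
      | nil =>
          have hS : S = [] := by
            simp only [List.length_cons, List.length_nil] at hlen
            exact List.length_eq_zero_iff.mp (by omega)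
          subst hS
          simp [pvWeave]
      | cons r R =>
          have step : W ++ c :: r :: R = (W ++ [c, r]) ++ R := by simp
          rw [step, ih (W ++ [c, r]) R (i + 1)
                (by simp only [List.length_cons] at hlen; omega)
                (by simp only [List.length_append, List.length_cons, List.length_nil]; push_cast; omega)]
          simp [pvWeave]

-- the fold over the whole text = phase 1 over the first half, then phase 2 over the second
lemma pv_fold_eq_weave (cs : List Char) :
    (cs.foldl (pvStepA ((cs.length / 2 : Nat) - 1)) ([], 0)).1
      = pvWeave (cs.drop (cs.length / 2)) (cs.take (cs.length / 2)) := by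
  set n := cs.length with hn
  set h := n / 2 with hh
  set mid : Int := ((h : Nat) : Int) - 1 with hmid
  have hsplit : cs = cs.take h ++ cs.drop h := (List.take_append_drop h cs).symm
  have hlen_take : (cs.take h).length = h := by
    rw [List.length_take]; omega
  have hlen_drop : (cs.drop h).length = n - h := by
    rw [List.length_drop]
  conv_lhs => rw [hsplit]
  rw [List.foldl_append]
  rw [pv_phase1 mid (cs.take h) [] 0 (by simp)
        (by rw [hlen_take]; simp [hmid])]
  have h2 := pv_phase2 mid (cs.drop h) [] (cs.take h) ((0:Int) + (cs.take h).length)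
      (by rw [hlen_drop, hlen_take]; omega)
      (by rw [hlen_take, hmid]; simp)
  simpa using h2

theorem pv_main (text : String) : decrypt_single text = decrypt_single_alt text := by
  unfold decrypt_single decrypt_single_alt
  simp only [PySem.Str.len]
  have hmid : PySem.Int.floordiv ((text.toList.length : Int)) 2 - 1
      = ((text.toList.length / 2 : Nat) : Int) - 1 := by
    rw [show ((2:Int)) = ((2:Nat):Int) by norm_num, PySem.Int.floordiv_natCast]
  rw [hmid, pv_fold_eq_weave]

-- ===== VERDICT (by name: the statement is the Claim_ definition above) =====
theorem decrypt_single_spec : Claim_equal_decrypt_single := by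
  intro text _
  unfold Spec_decrypt_single
  exact pv_main text
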